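-- pv_equiv track=rewrite | github.com/ubarredo/TextProcessing | text_processing.py | single_tokens
-- ===== SOURCE A (Python) =====
-- def single_tokens(o_text):
--     """Tokenizacion del texto en palabras individuales."""
--
--     # Se crea un string filtrado f_text a partir del string original o_text.
--     # Unicamente incluiremos los caracteres alfabeticos y los espacios, para el
--     # resto de caracteres introducimos la cadena ' . ' que actuara de
--     # separador.
--     f_text = ''
--     for i in o_text:
--         if i.isalpha() or i.isspace():
--             f_text += i
--         else:
--             f_text += ' . '
--
--     # Se divide la cadena f_text en la lista s_tokens por espacios sin incluir
--     # los puntos introducidos.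
--     s_tokens = [i for i in f_text.split() if i != '.']
--
--     # Si una palabra en mayuscula existe tambien en minuscula podemos pasarla
--     # a minuscula para homogeneizar los resultados.
--     exist = set(s_tokens)
--     for i, j in enumerate(s_tokens):
--         if j.istitle():
--             if j.lower() in exist:
--                 s_tokens[i] = j.lower()
--
--     return s_tokens
-- ===== SOURCE B (Python) =====
-- def single_tokens(o_text):
--     """Tokenizacion del texto en palabras individuales."""
--     # One left-to-right scan: collect maximal runs of alphabetic characters
--     # (any non-alphabetic character, space or not, ends the current run).
--     tokens = []
--     buf = []
--     for c in o_text: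
--         if c.isalpha():
--             buf.append(c)
--         elif buf:
--             tokens.append(''.join(buf))
--             buf = []
--     if buf:
--         tokens.append(''.join(buf))
--     # Lowercase a titlecase word when its lowercase form also occurs.
--     exist = set(tokens)
--     return [t.lower() if t.istitle() and t.lower() in exist else t for t in tokens]
-- ===== Notes on version B (the rewrite author's own statement) =====
-- stated objective: simpler
-- what changed: B tokenizes in one direct scan that collects maximal alphabetic runs, instead of A's building a filtered string with dot sentinels, whitespace-splitting it and filtering out the sentinel dots; phase 2 becomes a comprehension over the tokens instead of in-place index assignment.
import Mathlib
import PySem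

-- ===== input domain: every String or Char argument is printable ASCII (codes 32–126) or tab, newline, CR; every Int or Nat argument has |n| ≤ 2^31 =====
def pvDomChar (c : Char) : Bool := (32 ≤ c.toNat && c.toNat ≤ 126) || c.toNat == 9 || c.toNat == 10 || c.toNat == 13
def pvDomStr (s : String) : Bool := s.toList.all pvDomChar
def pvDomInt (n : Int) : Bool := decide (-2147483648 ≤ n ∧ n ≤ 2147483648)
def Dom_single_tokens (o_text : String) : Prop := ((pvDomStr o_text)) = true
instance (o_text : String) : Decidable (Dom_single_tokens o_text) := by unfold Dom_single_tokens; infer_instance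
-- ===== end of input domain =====

-- B replaces A's sentinel-string-then-split tokenization by a single direct scan
-- collecting maximal alphabetic runs (objective: simpler).

-- ===== PORT A =====
-- hand port of Python str.istitle (exact on ASCII: ASCII has no titlecase
-- characters, so CPython's scan reduces to upper/lower/uncased cases)
def pyIstitle : Bool → Bool → List Char → Bool
  | _, seen, [] => seen
  | prev, seen, c :: rest =>
    if PySem.Chars.isupper c then (if prev then false else pyIstitle true true rest)
    else if PySem.Chars.islower c then (if prev then pyIstitle true true rest else false)
    else pyIstitle false seen rest

-- the per-character contribution to A's filtered string f_text
def stEnc (c : Char) : List Char :=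
  if PySem.Chars.isalpha c || PySem.Chars.isspace c then [c] else [' ', '.', ' ']

def single_tokens (o_text : String) : List String :=
  let f_text := o_text.toList.foldl (fun acc c => acc ++ stEnc c) []
  let s_tokens := (PySem.Chars.split₀ f_text).filter (fun t => !(t == ['.']))
  let exist := PySem.Set.ofList s_tokens
  let s2 := (List.range s_tokens.length).foldl
    (fun st i =>
      let j := st.getD i []
      if pyIstitle false false j && exist.contains (PySem.Chars.lower j) then
        st.set i (PySem.Chars.lower j)
      else st) s_tokens
  s2.map (fun t => String.ofList t)

-- ===== PORT B =====
def single_tokens_alt (o_text : String) : List String :=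
  let p := o_text.toList.foldl
    (fun s c =>
      if PySem.Chars.isalpha c then (s.1, s.2 ++ [c])
      else if s.2 = [] then s else (s.1 ++ [s.2], ([] : List Char)))
    (([] : List (List Char)), ([] : List Char))
  let tokens := if p.2 = [] then p.1 else p.1 ++ [p.2]
  let exist := PySem.Set.ofList tokens
  tokens.map (fun t =>
    String.ofList (if pyIstitle false false t && exist.contains (PySem.Chars.lower t)
               then PySem.Chars.lower t else t))

-- ===== PRECONDITION & SPEC =====
def Spec_single_tokens (o_text : String) (out : List String) : Prop := out = single_tokens_alt o_text
instance (o_text : String) (out : List String) : Decidable (Spec_single_tokens o_text out) := by unfold Spec_single_tokens; infer_instance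

-- ===== CLAIM (what is proved, stated in full; the proofs are below) =====
def Claim_equal_single_tokens : Prop := ∀ (o_text : String), Dom_single_tokens o_text → Spec_single_tokens o_text (single_tokens o_text)

-- ===== LEMMAS AND PROOFS =====

-- the common tokenization both phase-1 loops compute: maximal alphabetic runs
def stCore : List Char → List Char → List (List Char)
  | buf, [] => if buf = [] then [] else [buf]
  | buf, c :: cs =>
    if PySem.Chars.isalpha c then stCore (buf ++ [c]) cs
    else if buf = [] then stCore [] cs else buf :: stCore [] cs

lemma alpha_not_space (c : Char) (h : PySem.Chars.isalpha c = true) :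
    PySem.Chars.isspace c = false := by
  simp only [PySem.Chars.isalpha, PySem.Chars.isupper, PySem.Chars.islower,
    Bool.or_eq_true, Bool.and_eq_true, decide_eq_true_eq, Char.le_def,
    UInt32.le_iff_toNat_le] at h
  simp only [PySem.Chars.isspace, Char.toNat, Bool.or_eq_false_iff, Bool.and_eq_false_iff,
    decide_eq_false_iff_not]
  have hA : ('A').val.toNat = 65 := rfl
  have hZ : ('Z').val.toNat = 90 := rfl
  have ha : ('a').val.toNat = 97 := rfl
  have hz : ('z').val.toNat = 122 := rfl
  rw [hA, hZ] at h; rw [ha, hz] at h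
  omega

lemma rev_ne_dot (cur : List Char) (hal : ∀ c ∈ cur, PySem.Chars.isalpha c = true)
    (_hne : cur ≠ []) : (cur.reverse == ['.']) = false := by
  apply beq_false_of_ne
  intro h
  have hm : ('.' : Char) ∈ cur := by
    have : ('.' : Char) ∈ cur.reverse := by rw [h]; simp
    simpa using this
  exact absurd (hal _ hm) (by decide)

lemma go_space (c : Char) (rest cur : List Char) (acc : List (List Char))
    (h : PySem.Chars.isspace c = true) :
    PySem.Chars.split₀.go (c :: rest) cur acc =
      if cur.isEmpty then PySem.Chars.split₀.go rest [] acc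
      else PySem.Chars.split₀.go rest [] (cur.reverse :: acc) := by
  simp [PySem.Chars.split₀.go, h]

lemma go_nonspace (c : Char) (rest cur : List Char) (acc : List (List Char))
    (h : PySem.Chars.isspace c = false) :
    PySem.Chars.split₀.go (c :: rest) cur acc =
      PySem.Chars.split₀.go rest (c :: cur) acc := by
  simp [PySem.Chars.split₀.go, h]

lemma split_go_flat (cs : List Char) :
    ∀ (cur : List Char) (acc : List (List Char)),
      (∀ c ∈ cur, PySem.Chars.isalpha c = true) →
      (PySem.Chars.split₀.go (cs.flatMap stEnc) cur acc).filter (fun t => !(t == ['.'])) =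
        acc.reverse.filter (fun t => !(t == ['.'])) ++ stCore cur.reverse cs := by
  induction cs with
  | nil =>
    intro cur acc hal
    by_cases h : cur = []
    · simp [PySem.Chars.split₀.go, h, stCore]
    · simp [PySem.Chars.split₀.go, h, stCore, List.isEmpty_iff, List.filter_append,
            rev_ne_dot cur hal h]
  | cons c cs ih =>
    intro cur acc hal
    by_cases ha : PySem.Chars.isalpha c = true
    · have hal' : ∀ x ∈ c :: cur, PySem.Chars.isalpha x = true := by
        intro x hx
        rcases List.mem_cons.mp hx with rfl | hx
        · exact ha
        · exact hal _ hx
      have henc : stEnc c = [c] := by simp [stEnc, ha]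
      rw [List.flatMap_cons, henc, List.singleton_append,
        go_nonspace c _ cur acc (alpha_not_space c ha), ih (c :: cur) acc hal']
      simp [stCore, ha]
    · by_cases hsp : PySem.Chars.isspace c = true
      · have henc : stEnc c = [c] := by simp [stEnc, hsp]
        rw [List.flatMap_cons, henc, List.singleton_append, go_space c _ cur acc hsp]
        by_cases h : cur = []
        · rw [if_pos (by simp [h]), ih [] acc (by simp)]
          simp [stCore, ha, h]
        · rw [if_neg (by simp [List.isEmpty_iff, h]), ih [] (cur.reverse :: acc) (by simp)]
          simp [stCore, ha, h, List.filter_append, rev_ne_dot cur hal h]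
      · have henc : stEnc c = [' ', '.', ' '] := by simp [stEnc, ha, hsp]
        rw [List.flatMap_cons, henc]
        show (PySem.Chars.split₀.go (' ' :: '.' :: ' ' :: cs.flatMap stEnc) cur acc).filter _ = _
        rw [go_space ' ' _ cur acc (by decide)]
        by_cases h : cur = []
        · rw [if_pos (by simp [h]),
            go_nonspace '.' _ [] acc (by decide),
            go_space ' ' _ ['.'] acc (by decide),
            if_neg (by simp)]
          simp only [List.reverse_cons, List.reverse_nil, List.nil_append]
          rw [ih [] (['.'] :: acc) (by simp)]
          simp [stCore, ha, h]
        · rw [if_neg (by simp [List.isEmpty_iff, h]),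
            go_nonspace '.' _ [] (cur.reverse :: acc) (by decide),
            go_space ' ' _ ['.'] (cur.reverse :: acc) (by decide),
            if_neg (by simp)]
          simp only [List.reverse_cons, List.reverse_nil, List.nil_append]
          rw [ih [] (['.'] :: cur.reverse :: acc) (by simp)]
          simp [stCore, ha, h, List.filter_append, rev_ne_dot cur hal h]

-- A's f_text is the concatenation of the per-character pieces
lemma ftext_eq (cs : List Char) :
    cs.foldl (fun acc c => acc ++ stEnc c) [] = cs.flatMap stEnc := by
  simpa using PySem.List.foldl_append_eq_flatMap stEnc cs []

-- B's scan with explicit buffer computes the same runs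
lemma bscan_eq (cs : List Char) :
    ∀ (toks : List (List Char)) (buf : List Char),
      (let p := cs.foldl
        (fun s c =>
          if PySem.Chars.isalpha c then (s.1, s.2 ++ [c])
          else if s.2 = [] then s else (s.1 ++ [s.2], ([] : List Char)))
        (toks, buf)
       if p.2 = [] then p.1 else p.1 ++ [p.2]) = toks ++ stCore buf cs := by
  induction cs with
  | nil =>
    intro toks buf
    by_cases h : buf = [] <;> simp [stCore, h]
  | cons c cs ih =>
    intro toks buf
    by_cases ha : PySem.Chars.isalpha c = true
    · simp only [List.foldl_cons, ha, if_true]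
      rw [ih toks (buf ++ [c])]
      simp [stCore, ha]
    · by_cases h : buf = []
      · simp only [List.foldl_cons, ha, Bool.false_eq_true, if_false, h, if_true]
        rw [ih toks []]
        simp [stCore, ha, h]
      · simp only [List.foldl_cons, ha, Bool.false_eq_true, if_false, h, if_true]
        rw [ih (toks ++ [buf]) []]
        simp [stCore, ha, h]

-- A's enumerate-and-assign loop is an elementwise map
lemma set_loop (g : List Char → List Char) (p : List Char → Bool) (l : List (List Char)) :
    ∀ (pre : List (List Char)),
      (List.range' pre.length l.length).foldl
        (fun st i =>
          if p (st.getD i []) then st.set i (g (st.getD i [])) else st) (pre ++ l) =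
        pre ++ l.map (fun j => if p j then g j else j) := by
  induction l with
  | nil => intro pre; simp
  | cons a l ih =>
    intro pre
    simp only [List.length_cons]
    rw [List.range'_succ, List.foldl_cons]
    have hget : (pre ++ a :: l).getD pre.length [] = a := by
      simp [List.getD]
    have hset : (pre ++ a :: l).set pre.length (g a) = pre ++ g a :: l := by
      rw [List.set_append]
      simp
    rw [hget]
    by_cases hp : p a = true
    · rw [if_pos hp, hset]
      have : pre.length + 1 = (pre ++ [g a]).length := by simp
      rw [show pre ++ g a :: l = (pre ++ [g a]) ++ l by simp, this, ih (pre ++ [g a])]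
      simp [hp]
    · rw [if_neg (by simp [hp])]
      have : pre.length + 1 = (pre ++ [a]).length := by simp
      rw [show pre ++ a :: l = (pre ++ [a]) ++ l by simp, this, ih (pre ++ [a])]
      simp [hp]

lemma set_loop0 (ex : PySem.Set (List Char)) (l : List (List Char)) :
    (List.range l.length).foldl
      (fun st i =>
        if pyIstitle false false (st.getD i []) && ex.contains (PySem.Chars.lower (st.getD i [])) then
          st.set i (PySem.Chars.lower (st.getD i [])) else st) l =
      l.map (fun j =>
        if pyIstitle false false j && ex.contains (PySem.Chars.lower j) then
          PySem.Chars.lower j else j) := by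
  have := set_loop (fun j => PySem.Chars.lower j)
    (fun j => pyIstitle false false j && ex.contains (PySem.Chars.lower j)) l []
  simpa [List.range_eq_range'] using this

-- ===== VERDICT (by name: the statement is the Claim_ definition above) =====
theorem single_tokens_spec : Claim_equal_single_tokens := by
  intro o_text _
  unfold Spec_single_tokens single_tokens single_tokens_alt
  dsimp only
  have htok : (PySem.Chars.split₀ (o_text.toList.foldl (fun acc c => acc ++ stEnc c) [])).filter
      (fun t => !(t == ['.'])) = stCore [] o_text.toList := by
    rw [ftext_eq]
    have := split_go_flat o_text.toList [] [] (by simp)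
    simpa [PySem.Chars.split₀] using this
  have hb := bscan_eq o_text.toList [] []
  dsimp only at hb
  simp only [htok, hb, List.nil_append]
  rw [set_loop0]
  simp [List.map_map, Function.comp, apply_ite String.ofList]
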